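-- pv_equiv track=rewrite | github.com/pypi-data/pypi-mirror-374 | packages/isaadvmutility/isaadvmutility-1.3.4.tar.gz/isaadvmutility-1.3.4/isaadvmutility/advmutility.py | sanatize
-- ===== SOURCE A (Python) =====
-- def sanatize(net_desc):
--     name_str = ''
--     if isinstance(net_desc, float):
--         return ''
--     if '\n' in net_desc:
--         for word in net_desc.split('\n'):
--             name_str = name_str + ' ' + word
--     else:
--         name_str = net_desc
--     s, sanatized_name = name_str.split(','), ''
--     if len(s) >= 1:
--         for word in s:
--             sanatized_name = sanatized_name + ' ' + word
--     else:
--         sanatized_name = name_str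
--     return sanatized_name
-- ===== SOURCE B (Python) =====
-- def sanatize(net_desc):
--     if isinstance(net_desc, float):
--         return ''
--     if '\n' in net_desc:
--         net_desc = ' ' + net_desc.replace('\n', ' ')
--     return ' ' + net_desc.replace(',', ' ')
-- ===== Notes on version B (the rewrite author's own statement) =====
-- stated objective: simpler
-- what changed: Replaced both split-then-reconcatenate accumulator loops with direct str.replace passes (plus the one extra leading space the newline pass contributes), eliminating the split calls and the quadratic string accumulation.
import Mathlib
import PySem

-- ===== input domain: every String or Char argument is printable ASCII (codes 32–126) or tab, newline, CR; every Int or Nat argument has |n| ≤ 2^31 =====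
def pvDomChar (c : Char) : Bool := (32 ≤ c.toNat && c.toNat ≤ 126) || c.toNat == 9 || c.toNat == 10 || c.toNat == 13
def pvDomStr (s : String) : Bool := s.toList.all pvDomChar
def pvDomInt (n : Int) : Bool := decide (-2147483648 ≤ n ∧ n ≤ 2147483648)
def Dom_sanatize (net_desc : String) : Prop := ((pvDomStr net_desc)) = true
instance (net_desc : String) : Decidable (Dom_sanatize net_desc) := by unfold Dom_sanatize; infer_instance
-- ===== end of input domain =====

-- B replaces A's two split-and-reconcatenate loops with direct replace passes: simpler, no quadratic accumulation.

-- ===== PORT A =====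
-- literal transliteration of A (the float guard is unreachable for a String argument)
def sanatize (net_desc : String) : String :=
  let s0 := net_desc.toList
  let nameStr : List Char :=
    if PySem.Chars.isIn ['\n'] s0 then
      (PySem.Chars.splitOn s0 ['\n']).foldl (fun acc w => acc ++ [' '] ++ w) []
    else s0
  let parts := PySem.Chars.splitOn nameStr [',']
  let sanatized :=
    if 1 ≤ parts.length then
      parts.foldl (fun acc w => acc ++ [' '] ++ w) []
    else nameStr
  String.ofList sanatized

-- ===== PORT B =====
def sanatize_alt (net_desc : String) : String :=
  let nd : List Char :=
    if PySem.Chars.isIn ['\n'] net_desc.toList then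
      ' ' :: PySem.Chars.replace net_desc.toList ['\n'] [' ']
    else net_desc.toList
  String.ofList (' ' :: PySem.Chars.replace nd [','] [' '])

-- ===== PRECONDITION & SPEC =====
def Spec_sanatize (net_desc : String) (out : String) : Prop := out = sanatize_alt net_desc
instance (net_desc : String) (out : String) : Decidable (Spec_sanatize net_desc out) := by unfold Spec_sanatize; infer_instance

-- ===== CLAIM (what is proved, stated in full; the proofs are below) =====
def Claim_equal_sanatize : Prop := ∀ (net_desc : String), Dom_sanatize net_desc → Spec_sanatize net_desc (sanatize net_desc)

-- ===== LEMMAS AND PROOFS =====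

-- single-character replace is a map
def pvRepl (c x : Char) : Char := if x = c then ' ' else x

theorem pv_replace_go_map (c : Char) : ∀ (fuel : Nat) (l acc : List Char), l.length ≤ fuel →
    PySem.Chars.replace.go [c] [' '] fuel l acc = acc.reverse ++ l.map (pvRepl c) := by
  intro fuel
  induction fuel with
  | zero =>
    intro l acc h
    have : l = [] := List.eq_nil_of_length_eq_zero (Nat.le_zero.mp h)
    subst this
    simp [PySem.Chars.replace.go]
  | succ n ih =>
    intro l acc h
    cases l with
    | nil => simp [PySem.Chars.replace.go]
    | cons x t =>
      simp only [PySem.Chars.replace.go, List.isPrefixOf]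
      by_cases hx : c = x
      · subst hx
        have hd : List.drop [c].length (c :: t) = t := rfl
        simp only [beq_self_eq_true, Bool.true_and, if_true, hd]
        rw [ih t _ (by simpa using h)]
        simp [pvRepl]
      · have hb : (c == x && true) = false := by simp [hx]
        simp only [hb, Bool.false_eq_true, if_false]
        rw [ih t _ (by simpa using h)]
        simp [pvRepl, Ne.symm hx]

theorem pv_replace_map (c : Char) (l : List Char) :
    PySem.Chars.replace l [c] [' '] = l.map (pvRepl c) := by
  have h := pv_replace_go_map c l.length l [] (le_refl _)
  simpa [PySem.Chars.replace] using h

-- simple structural characterisation of single-character splitOn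
def pvSplit (c : Char) : List Char → List Char → List (List Char)
  | pre, [] => [pre]
  | pre, x :: t => if x = c then pre :: pvSplit c [] t else pvSplit c (pre ++ [x]) t

theorem pv_splitOn_go (c : Char) : ∀ (fuel : Nat) (l cur : List Char) (acc : List (List Char)), l.length ≤ fuel →
    PySem.Chars.splitOn.go [c] fuel l cur acc = acc.reverse ++ pvSplit c cur.reverse l := by
  intro fuel
  induction fuel with
  | zero =>
    intro l cur acc h
    have : l = [] := List.eq_nil_of_length_eq_zero (Nat.le_zero.mp h)
    subst this
    simp [PySem.Chars.splitOn.go, pvSplit]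
  | succ n ih =>
    intro l cur acc h
    cases l with
    | nil => simp [PySem.Chars.splitOn.go, pvSplit]
    | cons x t =>
      simp only [PySem.Chars.splitOn.go, List.isPrefixOf]
      by_cases hx : c = x
      · subst hx
        have hd : List.drop [c].length (c :: t) = t := rfl
        simp only [beq_self_eq_true, Bool.true_and, if_true, hd]
        rw [ih t [] _ (by simpa using h)]
        simp [pvSplit]
      · have hb : (c == x && true) = false := by simp [hx]
        simp only [hb, Bool.false_eq_true, if_false]
        rw [ih t (x :: cur) acc (by simpa using h)]
        simp [pvSplit, Ne.symm hx]

theorem pv_splitOn_eq (c : Char) (l : List Char) :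
    PySem.Chars.splitOn l [c] = pvSplit c [] l := by
  have h := pv_splitOn_go c (l.length + 1) l [] [] (Nat.le_succ _)
  simpa [PySem.Chars.splitOn] using h

-- folding ' ' + word over the split pieces is one leading space plus the mapped string
theorem pv_fold_split (c : Char) : ∀ (l pre a : List Char),
    (pvSplit c pre l).foldl (fun acc w => acc ++ [' '] ++ w) a
      = a ++ [' '] ++ pre ++ l.map (pvRepl c) := by
  intro l
  induction l with
  | nil => intro pre a; simp [pvSplit]
  | cons x t ih =>
    intro pre a
    by_cases hx : x = c
    · subst hx
      have e : pvSplit x pre (x :: t) = pre :: pvSplit x [] t := by simp [pvSplit]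
      rw [e]
      simp only [List.foldl_cons]
      rw [ih [] (a ++ [' '] ++ pre)]
      simp [pvRepl]
    · have e : pvSplit c pre (x :: t) = pvSplit c (pre ++ [x]) t := by simp [pvSplit, hx]
      rw [e, ih (pre ++ [x]) a]
      simp [pvRepl, hx]

theorem pv_split_ne_nil (c : Char) : ∀ (l pre : List Char), pvSplit c pre l ≠ [] := by
  intro l
  induction l with
  | nil => intro pre; simp [pvSplit]
  | cons x t ih =>
    intro pre
    by_cases hx : x = c
    · simp [pvSplit, hx]
    · simp only [pvSplit, if_neg hx]; exact ih _

theorem pv_parts_len (c : Char) (l : List Char) :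
    1 ≤ (PySem.Chars.splitOn l [c]).length := by
  rw [pv_splitOn_eq]
  have := pv_split_ne_nil c l []
  cases hh : pvSplit c [] l with
  | nil => exact absurd hh this
  | cons _ _ => simp

-- ===== VERDICT (by name: the statement is the Claim_ definition above) =====
theorem sanatize_spec : Claim_equal_sanatize := by
  intro net_desc _
  unfold Spec_sanatize sanatize sanatize_alt
  simp only
  by_cases hnl : PySem.Chars.isIn ['\n'] net_desc.toList
  · rw [if_pos hnl, if_pos hnl, if_pos (pv_parts_len ',' _)]
    simp only [pv_splitOn_eq, pv_fold_split, pv_replace_map]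
    simp [pvRepl]
  · rw [if_neg hnl, if_neg hnl, if_pos (pv_parts_len ',' _)]
    simp only [pv_splitOn_eq, pv_fold_split, pv_replace_map]
    simp
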